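-- pv_equiv track=rewrite | github.com/acellison/spherinder | geometric_hydrodynamics.py | permutation_indices
-- ===== SOURCE A (Python) =====
-- def permutation_indices(Lmax, Nmax):
--     """For each mode interlace the five field variables.  Returns two lists of
--        permutation indices, the first for the columns (variable ordering), and
--        the second for the rows (equation sorting).  Leaves tau variables as the
--        final set of coefficients so the tau columns are in the same location -
--        horizontally block appended to the matrix"""
--     nfields = 4
--     nvar = Lmax*Nmax
--     neqn = (Lmax+2)*(Nmax+1)
--     ntau = 2*(Nmax+1)+Lmax
--
--     variables = [range(i*nvar,(i+1)*nvar) for i in range(nfields)]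
--     equations = [range(i*neqn,(i+1)*neqn) for i in range(nfields)]
--
--     vartau = range(nfields*nvar,nfields*(nvar+ntau))
--     varindices = [val for tup in zip(*variables) for val in tup]
--     varindices = varindices + list(vartau)
--     eqnindices = [val for tup in zip(*equations) for val in tup]
--     return varindices, eqnindices
-- ===== SOURCE B (Python) =====
-- def permutation_indices(Lmax, Nmax):
--     """For each mode interlace the four field variables; tau variables stay
--        as the final block of coefficients.  The interleaving is obtained by
--        sorting the flat index range by each index's target rank
--        (column, block) = (j % m, j // m), encoded as the single integer
--        (j % m)*4 + j//m."""
--     nvar = Lmax * Nmax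
--     neqn = (Lmax + 2) * (Nmax + 1)
--     ntau = 2 * (Nmax + 1) + Lmax
--
--     def interleave(m):
--         return sorted(range(4 * m), key=lambda j: (j % m) * 4 + j // m)
--
--     varindices = interleave(nvar) + list(range(4 * nvar, 4 * (nvar + ntau)))
--     eqnindices = interleave(neqn)
--     return varindices, eqnindices
-- ===== Notes on version B (the rewrite author's own statement) =====
-- stated objective: alternative
-- what changed: B replaces A's zip(*ranges) transposition by a sort: it sorts the flat index range(4*m) by each index's target rank (j % m)*4 + j//m, a rank-sorting formulation instead of interleaving four range objects.
import Mathlib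
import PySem

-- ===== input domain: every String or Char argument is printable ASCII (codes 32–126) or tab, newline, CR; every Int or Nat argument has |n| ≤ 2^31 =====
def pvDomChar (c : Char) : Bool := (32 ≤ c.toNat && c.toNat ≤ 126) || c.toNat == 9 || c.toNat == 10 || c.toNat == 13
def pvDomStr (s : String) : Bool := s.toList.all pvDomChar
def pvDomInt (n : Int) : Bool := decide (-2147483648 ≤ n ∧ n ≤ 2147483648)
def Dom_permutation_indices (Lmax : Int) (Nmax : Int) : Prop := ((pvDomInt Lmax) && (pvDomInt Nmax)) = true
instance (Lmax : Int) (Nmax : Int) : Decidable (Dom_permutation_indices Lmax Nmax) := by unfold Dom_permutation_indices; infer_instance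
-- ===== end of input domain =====

-- B replaces A's zip(*ranges) transposition by sorting the flat index range by each
-- index's target rank (j % m)*4 + j//m (objective: alternative algorithm).

-- ===== PORT A =====
-- zip(*lists): take the heads while every list is nonempty; the result is no longer
-- than the first list, so the first list's length serves as fuel.
def pvZipStarAux : Nat → List (List Int) → List (List Int)
  | 0, _ => []
  | n + 1, ls =>
    if ls.all (fun l => !l.isEmpty) then
      (ls.map (fun l => l.headD 0)) :: pvZipStarAux n (ls.map List.tail)
    else []

def pvZipStar (ls : List (List Int)) : List (List Int) :=
  pvZipStarAux (ls.headD []).length ls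

def permutation_indices (Lmax : Int) (Nmax : Int) : List Int × List Int :=
  let nfields : Int := 4
  let nvar := Lmax * Nmax
  let neqn := (Lmax + 2) * (Nmax + 1)
  let ntau := 2 * (Nmax + 1) + Lmax
  let varlists := (PySem.List.pyRange 0 nfields 1).map
    (fun i => PySem.List.pyRange (i * nvar) ((i + 1) * nvar) 1)
  let equations := (PySem.List.pyRange 0 nfields 1).map
    (fun i => PySem.List.pyRange (i * neqn) ((i + 1) * neqn) 1)
  let vartau := PySem.List.pyRange (nfields * nvar) (nfields * (nvar + ntau)) 1
  let varindices := (pvZipStar varlists).flatMap id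
  let varindices := varindices ++ vartau
  let eqnindices := (pvZipStar equations).flatMap id
  (varindices, eqnindices)

-- ===== PORT B =====
-- Source B's helper: sorted(range(4*m), key=lambda j: (j % m)*4 + j//m)
def pvInterleaveB (m : Int) : List Int :=
  PySem.List.sorted (PySem.List.pyRange 0 (4 * m) 1)
    (fun j => PySem.Int.mod j m * 4 + PySem.Int.floordiv j m) false

def permutation_indices_alt (Lmax : Int) (Nmax : Int) : List Int × List Int :=
  let nvar := Lmax * Nmax
  let neqn := (Lmax + 2) * (Nmax + 1)
  let ntau := 2 * (Nmax + 1) + Lmax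
  let varindices := pvInterleaveB nvar ++ PySem.List.pyRange (4 * nvar) (4 * (nvar + ntau)) 1
  let eqnindices := pvInterleaveB neqn
  (varindices, eqnindices)

-- ===== PRECONDITION & SPEC =====
def Spec_permutation_indices (Lmax : Int) (Nmax : Int) (out : List Int × List Int) : Prop := out = permutation_indices_alt Lmax Nmax
instance (Lmax : Int) (Nmax : Int) (out : List Int × List Int) : Decidable (Spec_permutation_indices Lmax Nmax out) := by unfold Spec_permutation_indices; infer_instance

-- ===== CLAIM (what is proved, stated in full; the proofs are below) =====
def Claim_equal_permutation_indices : Prop := ∀ (Lmax : Int) (Nmax : Int), Dom_permutation_indices Lmax Nmax → Spec_permutation_indices Lmax Nmax (permutation_indices Lmax Nmax)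

-- ===== LEMMAS AND PROOFS =====

-- the canonical interleaving both sides are shown equal to
def pvCanon (m : Int) : List Int :=
  (List.range m.toNat).flatMap (fun k : Nat => [(k : Int), m + k, 2 * m + k, 3 * m + k])

-- zip(*) of four maps over the same index list is the map of the 4-tuples.
lemma pvZipStarAux_four (ks : List Nat) (f0 f1 f2 f3 : Nat → Int) :
    pvZipStarAux ks.length [ks.map f0, ks.map f1, ks.map f2, ks.map f3]
      = ks.map (fun k => [f0 k, f1 k, f2 k, f3 k]) := by
  induction ks with
  | nil => rfl
  | cons k t ih => simp [pvZipStarAux, ih]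

lemma pvZipStarAux_range (n : Nat) (f0 f1 f2 f3 : Nat → Int) :
    pvZipStarAux n [(List.range n).map f0, (List.range n).map f1,
        (List.range n).map f2, (List.range n).map f3]
      = (List.range n).map (fun k => [f0 k, f1 k, f2 k, f3 k]) := by
  have h := pvZipStarAux_four (List.range n) f0 f1 f2 f3
  simpa using h

lemma pvRangeBlock (j m : Int) :
    PySem.List.pyRange (j * m) ((j + 1) * m) 1
      = (List.range m.toNat).map (fun k : Nat => j * m + (k : Int)) := by
  rw [PySem.List.pyRange_one]
  congr 1
  have : (j + 1) * m - j * m = m := by ring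
  rw [this]

-- A's zip(*ranges) interleaving is the canonical interleaving
lemma pvA_interleave (m : Int) :
    (pvZipStar ((PySem.List.pyRange 0 4 1).map
        (fun i => PySem.List.pyRange (i * m) ((i + 1) * m) 1))).flatMap id
      = pvCanon m := by
  have h4 : PySem.List.pyRange 0 4 1 = [0, 1, 2, 3] := by decide
  rw [h4]
  simp only [List.map_cons, List.map_nil, pvRangeBlock]
  unfold pvZipStar
  simp only [List.headD_cons, List.length_map, List.length_range]
  rw [pvZipStarAux_range, List.flatMap_map]
  unfold pvCanon
  apply List.flatMap_congr
  intro k _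
  simp only [id_eq, List.cons.injEq]
  repeat' apply And.intro
  all_goals first | trivial | omega

-- flatMap of 4-tuples is a permutation of the four concatenated maps
lemma pvPerm4 (l : List Nat) (f0 f1 f2 f3 : Nat → Int) :
    (l.flatMap (fun k => [f0 k, f1 k, f2 k, f3 k])).Perm
      (l.map f0 ++ (l.map f1 ++ (l.map f2 ++ l.map f3))) := by
  induction l with
  | nil => simp
  | cons k t ih =>
    simp only [List.flatMap_cons, List.map_cons, List.cons_append]
    rw [List.perm_iff_count]
    intro a
    have h := List.perm_iff_count.mp ih a
    simp only [List.count_append] at h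
    simp only [List.count_cons, List.count_append, List.count_nil, h]
    omega

-- four consecutive ranks per column enumerate the whole flat range
lemma pvFourBlock (n : Nat) :
    (List.range n).flatMap
        (fun k : Nat => [((k : Int)) * 4, (k : Int) * 4 + 1, (k : Int) * 4 + 2, (k : Int) * 4 + 3])
      = PySem.List.pyRange 0 (4 * (n : Int)) 1 := by
  induction n with
  | zero =>
    rw [PySem.List.pyRange_one_eq_nil (by simp)]
    simp
  | succ n ih =>
    rw [List.range_succ, List.flatMap_append, ih]
    have h1 : (4 * ((n + 1 : Nat) : Int)) = 4 * (n : Int) + 4 := by push_cast; ring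
    rw [h1, PySem.List.pyRange_one_append 0 (4 * (n : Int)) (4 * (n : Int) + 4)
      (by positivity) (by omega)]
    congr 1
    rw [PySem.List.pyRange_one_cons (by omega), PySem.List.pyRange_one_cons (by omega),
        PySem.List.pyRange_one_cons (by omega), PySem.List.pyRange_one_cons (by omega),
        PySem.List.pyRange_one_eq_nil (by omega)]
    simp only [List.flatMap_cons, List.flatMap_nil, List.append_nil, List.cons.injEq]
    repeat' apply And.intro
    all_goals first | trivial | omega

-- the rank key evaluated on block i, column k
lemma pvKey (m i k : Int) (hm : 0 < m) (hk0 : 0 ≤ k) (hkm : k < m) :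
    PySem.Int.mod (i * m + k) m * 4 + PySem.Int.floordiv (i * m + k) m = k * 4 + i := by
  rw [PySem.Int.mod_eq_emod_of_pos hm, PySem.Int.floordiv_eq_ediv_of_pos hm]
  have h1 : i * m + k = k + m * i := by ring
  rw [h1, Int.add_mul_emod_self_left, Int.emod_eq_of_lt hk0 hkm,
      Int.add_mul_ediv_left _ _ (by omega : m ≠ 0), Int.ediv_eq_zero_of_lt hk0 hkm]
  ring

-- key values along the canonical interleaving are 0,1,2,…,4m-1
lemma pvCanonMapKey (m : Int) (hm : 0 < m) :
    (pvCanon m).map (fun j => PySem.Int.mod j m * 4 + PySem.Int.floordiv j m)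
      = PySem.List.pyRange 0 (4 * m) 1 := by
  have hmn : ((m.toNat : Nat) : Int) = m := by omega
  unfold pvCanon
  rw [List.map_flatMap]
  rw [show (4 * m) = 4 * ((m.toNat : Nat) : Int) by omega, ← pvFourBlock]
  apply List.flatMap_congr
  intro k hk
  have hk0 : (0 : Int) ≤ (k : Int) := by positivity
  have hkm : ((k : Nat) : Int) < m := by
    have := List.mem_range.mp hk; omega
  simp only [List.map_cons, List.map_nil, List.cons.injEq]
  refine ⟨?_, ?_, ?_, ?_, trivial⟩
  · rw [show ((k : Nat) : Int) = 0 * m + (k : Int) by ring, pvKey m 0 (k : Int) hm (by omega) (by omega)]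
    ring
  · rw [show m + ((k : Nat) : Int) = 1 * m + (k : Int) by ring, pvKey m 1 (k : Int) hm hk0 hkm]
  · rw [show 2 * m + ((k : Nat) : Int) = 2 * m + (k : Int) by ring, pvKey m 2 (k : Int) hm hk0 hkm]
  · rw [show 3 * m + ((k : Nat) : Int) = 3 * m + (k : Int) by ring, pvKey m 3 (k : Int) hm hk0 hkm]

-- the canonical interleaving is a rearrangement of the flat range
lemma pvCanonPerm (m : Int) (hm : 0 < m) :
    (pvCanon m).Perm (PySem.List.pyRange 0 (4 * m) 1) := by
  have b0 : PySem.List.pyRange 0 m 1 = (List.range m.toNat).map (fun k : Nat => ((k : Nat) : Int)) := by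
    have := pvRangeBlock 0 m; simpa using this
  have b1 : PySem.List.pyRange m (2 * m) 1 = (List.range m.toNat).map (fun k : Nat => m + (k : Int)) := by
    have := pvRangeBlock 1 m; norm_num at this; exact this
  have b2 : PySem.List.pyRange (2 * m) (3 * m) 1 = (List.range m.toNat).map (fun k : Nat => 2 * m + (k : Int)) := by
    have := pvRangeBlock 2 m; norm_num at this; exact this
  have b3 : PySem.List.pyRange (3 * m) (4 * m) 1 = (List.range m.toNat).map (fun k : Nat => 3 * m + (k : Int)) := by
    have := pvRangeBlock 3 m; norm_num at this; exact this
  rw [PySem.List.pyRange_one_append 0 m (4 * m) (by omega) (by omega),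
      PySem.List.pyRange_one_append m (2 * m) (4 * m) (by omega) (by omega),
      PySem.List.pyRange_one_append (2 * m) (3 * m) (4 * m) (by omega) (by omega),
      b0, b1, b2, b3]
  exact pvPerm4 (List.range m.toNat) _ _ _ _

-- B's sort produces the canonical interleaving
lemma pvB_interleave (m : Int) : pvInterleaveB m = pvCanon m := by
  by_cases hm : 0 < m
  · have hp : (PySem.List.pyRange 0 (4 * m) 1).Pairwise (· < ·) :=
      PySem.List.pairwise_lt_pyRange_one 0 (4 * m)
    rw [← pvCanonMapKey m hm] at hp
    unfold pvInterleaveB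
    exact PySem.List.sorted_eq_of_perm_of_pairwise_lt _ _ _ (pvCanonPerm m hm)
      (List.pairwise_map.mp hp)
  · have h1 : PySem.List.pyRange 0 (4 * m) 1 = [] :=
      PySem.List.pyRange_one_eq_nil (by omega)
    have h2 : m.toNat = 0 := by omega
    simp [pvInterleaveB, pvCanon, h1, h2, PySem.List.sorted_eq_nil_iff]

-- ===== VERDICT (by name: the statement is the Claim_ definition above) =====
theorem permutation_indices_spec : Claim_equal_permutation_indices := by
  intro Lmax Nmax _
  unfold Spec_permutation_indices permutation_indices permutation_indices_alt
  simp only []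
  rw [pvA_interleave, pvA_interleave, pvB_interleave, pvB_interleave]
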